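-- pv_equiv track=rewrite | github.com/Beatriz0509/IA | Guião 1/aula1.py | remove_e_conta
-- ===== SOURCE A (Python) =====
-- def remove_e_conta(lista, elem):
--     if not lista:
--         return ([], 0)
--     if lista[0] == elem:
--         sublist, ocorrencia = remove_e_conta(lista[1:], elem)
--         return (sublist, ocorrencia + 1)
--     else:
--         sublist, ocorrencia = remove_e_conta(lista[1:], elem)
--         return ([lista[0]] + sublist, ocorrencia)
-- ===== SOURCE B (Python) =====
-- def remove_e_conta(lista, elem):
--     resultado = []
--     contador = 0
--     for x in lista:
--         if x == elem:
--             contador += 1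
--         else:
--             resultado.append(x)
--     return (resultado, contador)
-- ===== Notes on version B (the rewrite author's own statement) =====
-- stated objective: faster
-- what changed: Replaced A's slice-based structural recursion (which rebuilds the tail via lista[1:] and prepends at each level) with a single explicit for-loop carrying a result accumulator and a counter.
import Mathlib
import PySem

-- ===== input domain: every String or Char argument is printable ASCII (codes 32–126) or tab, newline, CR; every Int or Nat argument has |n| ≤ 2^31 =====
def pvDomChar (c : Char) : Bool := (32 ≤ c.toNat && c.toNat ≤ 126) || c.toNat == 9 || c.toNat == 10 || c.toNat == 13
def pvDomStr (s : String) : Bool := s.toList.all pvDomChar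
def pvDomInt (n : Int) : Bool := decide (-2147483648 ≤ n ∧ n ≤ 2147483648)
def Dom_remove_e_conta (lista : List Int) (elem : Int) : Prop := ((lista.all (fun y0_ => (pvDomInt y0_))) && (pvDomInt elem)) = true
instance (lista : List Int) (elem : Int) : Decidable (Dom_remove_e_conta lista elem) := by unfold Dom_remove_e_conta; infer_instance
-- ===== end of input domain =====

-- ===== PORT A =====
-- B replaces A's slice-based recursion with one explicit loop carrying an accumulator and counter (faster: O(n) vs A's O(n^2) slicing).
def remove_e_conta (lista : List Int) (elem : Int) : List Int × Int :=
  match lista with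
  | [] => ([], 0)
  | x :: rest =>
    if x = elem then
      let r := remove_e_conta rest elem
      (r.1, r.2 + 1)
    else
      let r := remove_e_conta rest elem
      ([x] ++ r.1, r.2)

-- ===== PORT B =====
def remove_e_conta_alt (lista : List Int) (elem : Int) : List Int × Int :=
  lista.foldl (fun acc x =>
    if x = elem then (acc.1, acc.2 + 1) else (acc.1 ++ [x], acc.2)) ([], 0)

-- ===== PRECONDITION & SPEC =====
def Spec_remove_e_conta (lista : List Int) (elem : Int) (out : List Int × Int) : Prop := out = remove_e_conta_alt lista elem
instance (lista : List Int) (elem : Int) (out : List Int × Int) : Decidable (Spec_remove_e_conta lista elem out) := by unfold Spec_remove_e_conta; infer_instance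

-- ===== CLAIM (what is proved, stated in full; the proofs are below) =====
def Claim_equal_remove_e_conta : Prop := ∀ (lista : List Int) (elem : Int), Dom_remove_e_conta lista elem → Spec_remove_e_conta lista elem (remove_e_conta lista elem)

-- ===== LEMMAS AND PROOFS =====

-- ===== VERDICT (by name: the statement is the Claim_ definition above) =====
lemma alt_foldl_shift (lista : List Int) (elem : Int) (r : List Int) (c : Int) :
    lista.foldl (fun acc x =>
      if x = elem then (acc.1, acc.2 + 1) else (acc.1 ++ [x], acc.2)) (r, c)
    = (r ++ (remove_e_conta lista elem).1, c + (remove_e_conta lista elem).2) := by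
  induction lista generalizing r c with
  | nil => simp [remove_e_conta]
  | cons x rest ih =>
    by_cases h : x = elem <;> simp [remove_e_conta, h, List.foldl_cons, ih] <;> ring

theorem remove_e_conta_spec : Claim_equal_remove_e_conta := by
  intro lista elem _
  unfold Spec_remove_e_conta remove_e_conta_alt
  rw [alt_foldl_shift]
  simp
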